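-- pv_equiv track=rewrite | github.com/workprinond/DS_-_Algo_TechInterview_Practise | Beginning/movies_on_flight.py | longestPair2
-- ===== SOURCE A (Python) =====
-- def longestPair2(ary, d):
--     '''
--     # case 1 - example input
--     >>> longestPair2([90, 85, 75, 60, 120, 150, 125], 250)
--     [0, 6]
--     # case 2 - empty array
--     >>> longestPair2([], 250)
--     [-1, -1]
--     # case 3 - all duplicates
--     >>> longestPair2([90, 10, 80, 20, 70, 30, 60, 40, 50, 50], 130)
--     [0, 1]
--     # case 4 - short flight duration, no movies can watch
--     >>> longestPair2([90, 10, 80, 20, 70, 30, 60, 40, 50, 50], 5)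
--     [-1, -1]
--     '''
--     d = d - 30
--     origIndex = {duration: index for index, duration in enumerate(ary)}
--     ary = sorted(ary)
--     left, right = 0, len(ary) - 1
--     maxDuration = 0
--     maxPair = []
--
--     while left < right:
--         curDuration = ary[left] + ary[right]
--         if curDuration <= d:
--             if curDuration > maxDuration:
--                 maxPair = [ary[left], ary[right]]
--                 maxDuration = curDuration
--             left += 1
--         else:
--             right -= 1
--
--     if not maxPair:
--         return [-1, -1]
--
--     return sorted([origIndex[maxPair[0]], origIndex[maxPair[1]]])
-- ===== SOURCE B (Python) =====
-- def longestPair2(ary, d):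
--     d = d - 30
--     origIndex = {duration: index for index, duration in enumerate(ary)}
--     s = sorted(ary)
--     pairs = [(x, y) for k, x in enumerate(s) for y in s[k + 1:]]
--     best, pair = 0, None
--     for x, y in pairs:
--         if x + y <= d and x + y > best:
--             best, pair = x + y, (x, y)
--     if pair is None:
--         return [-1, -1]
--     return sorted([origIndex[pair[0]], origIndex[pair[1]]])
-- ===== Notes on version B (the rewrite author's own statement) =====
-- stated objective: alternative
-- what changed: B replaces A's two-pointer scan over the sorted array with one exhaustive pass over the explicit list of all pairs i<j of the sorted array, keeping the first strictly-improving qualifying sum; the list/dict post-processing is unchanged.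
import Mathlib
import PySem

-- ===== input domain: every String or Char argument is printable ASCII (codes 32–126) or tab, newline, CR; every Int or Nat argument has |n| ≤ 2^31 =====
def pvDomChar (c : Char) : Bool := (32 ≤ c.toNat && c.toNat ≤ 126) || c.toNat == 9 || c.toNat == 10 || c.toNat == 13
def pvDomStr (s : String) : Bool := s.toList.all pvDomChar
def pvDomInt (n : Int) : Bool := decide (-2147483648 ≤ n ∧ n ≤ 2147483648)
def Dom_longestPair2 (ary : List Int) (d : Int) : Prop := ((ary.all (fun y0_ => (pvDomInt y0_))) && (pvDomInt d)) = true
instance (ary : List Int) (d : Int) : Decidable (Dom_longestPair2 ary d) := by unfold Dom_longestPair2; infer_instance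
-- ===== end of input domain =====

-- B replaces A's sort + two-pointer scan with a single fold over the explicit list of all
-- sorted pairs (i < j), tracking strictly improving sums — a different algorithm of O(n^2)
-- cost (not faster); the return value is identical.

-- ===== PORT A =====
-- A's while-loop; indices l, r always lie in range when the loop body runs (Python never
-- raises here), so ary[left]/ary[right] is ported with the total pyGetD form.
def tpLoop (s : List Int) (d' : Int) (l r : Int) (m : Int) (p : List Int) : Int × List Int :=
  if _h : l < r then
    let cur := PySem.List.pyGetD s l 0 + PySem.List.pyGetD s r 0
    if cur ≤ d' then
      if cur > m then tpLoop s d' (l + 1) r cur [PySem.List.pyGetD s l 0, PySem.List.pyGetD s r 0]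
      else tpLoop s d' (l + 1) r m p
    else tpLoop s d' l (r - 1) m p
  else (m, p)
termination_by (r - l).toNat
decreasing_by all_goals omega

-- origIndex[x] is looked up only at values of ary (always present), so the total getD form is exact
def longestPair2 (ary : List Int) (d : Int) : List Int :=
  let d' := d - 30
  let origIndex : PySem.Dict Int Int :=
    (PySem.List.enumerate ary).foldl (fun dct iv => dct.insert iv.2 iv.1) PySem.Dict.empty
  let s := PySem.List.sorted ary (fun x => x) false
  let mp := tpLoop s d' 0 ((s.length : Int) - 1) 0 []
  if mp.2 = [] then [-1, -1]
  else PySem.List.sorted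
    [origIndex.getD (PySem.List.pyGetD mp.2 0 0) 0, origIndex.getD (PySem.List.pyGetD mp.2 1 0) 0]
    (fun x => x) false

-- ===== PORT B =====
def bStep (d' : Int) (acc : Int × Option (Int × Int)) (xy : Int × Int) : Int × Option (Int × Int) :=
  if xy.1 + xy.2 ≤ d' ∧ acc.1 < xy.1 + xy.2 then (xy.1 + xy.2, some xy) else acc

def bPairs (s : List Int) : List (Int × Int) :=
  (PySem.List.enumerate s).flatMap
    (fun kx => (PySem.List.slice s (some (kx.1 + 1)) none).map (fun y => (kx.2, y)))

def longestPair2_alt (ary : List Int) (d : Int) : List Int :=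
  let d' := d - 30
  let origIndex : PySem.Dict Int Int :=
    (PySem.List.enumerate ary).foldl (fun dct iv => dct.insert iv.2 iv.1) PySem.Dict.empty
  let s := PySem.List.sorted ary (fun x => x) false
  let bp := (bPairs s).foldl (bStep d') (0, none)
  match bp.2 with
  | none => [-1, -1]
  | some xy => PySem.List.sorted [origIndex.getD xy.1 0, origIndex.getD xy.2 0] (fun x => x) false

-- ===== PRECONDITION & SPEC =====
def Spec_longestPair2 (ary : List Int) (d : Int) (out : List Int) : Prop := out = longestPair2_alt ary d
instance (ary : List Int) (d : Int) (out : List Int) : Decidable (Spec_longestPair2 ary d out) := by unfold Spec_longestPair2; infer_instance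

-- ===== CLAIM (what is proved, stated in full; the proofs are below) =====
def Claim_equal_longestPair2 : Prop := ∀ (ary : List Int) (d : Int), Dom_longestPair2 ary d → Spec_longestPair2 ary d (longestPair2 ary d)

-- ===== LEMMAS AND PROOFS =====

-- Common characterisation of the winning pair: both loops end in state (m, pair) with
--  • no qualifying pair (0 < sum ≤ d') exists, and pair is empty / none,  or
--  • m is the maximum qualifying sum, pair realises it, and pair's first component is the
--    least value occurring as the smaller element of a maximum pair.

def TPost (s : List Int) (d' : Int) (res : Int × List Int) : Prop :=
  (res.2 = [] ∧ ∀ i j : Nat, i < j → j < s.length → s.getD i 0 + s.getD j 0 ≤ d' → s.getD i 0 + s.getD j 0 ≤ 0) ∨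
  (∃ i j : Nat, i < j ∧ j < s.length ∧ s.getD i 0 + s.getD j 0 = res.1 ∧ 0 < res.1 ∧ res.1 ≤ d' ∧
    res.2 = [s.getD i 0, s.getD j 0] ∧
    (∀ i' j' : Nat, i' < j' → j' < s.length → s.getD i' 0 + s.getD j' 0 ≤ d' → s.getD i' 0 + s.getD j' 0 ≤ res.1) ∧
    (∀ i' j' : Nat, i' < j' → j' < s.length → s.getD i' 0 + s.getD j' 0 = res.1 → s.getD i 0 ≤ s.getD i' 0))

lemma gd_mono (s : List Int) (hs : s.Pairwise (· ≤ ·)) {i j : Nat} (hij : i ≤ j) (hj : j < s.length) :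
    s.getD i 0 ≤ s.getD j 0 := by
  rcases lt_or_eq_of_le hij with h | h
  · rw [List.getD_eq_getElem s 0 (lt_trans h hj), List.getD_eq_getElem s 0 hj]
    exact List.pairwise_iff_getElem.mp hs i j (lt_trans h hj) hj h
  · subst h; rfl

lemma pyGetD_eq_getD (s : List Int) (i : Int) (h0 : 0 ≤ i) (h1 : i < (s.length : Int)) :
    PySem.List.pyGetD s i 0 = s.getD i.toNat 0 := by
  rw [PySem.List.pyGetD_eq_getElem s 0 h0 h1, List.getD_eq_getElem s 0 (by omega)]

lemma tp_inv (s : List Int) (d' : Int) (hs : s.Pairwise (· ≤ ·)) :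
    ∀ (k : Nat) (l r m : Int) (p : List Int),
    (r - l).toNat = k →
    0 ≤ l → l ≤ r → r < (s.length : Int) → 0 ≤ m →
    (∀ i j : Nat, i < j → j < s.length → ((i : Int) < l ∨ r < (j : Int)) →
       s.getD i 0 + s.getD j 0 ≤ d' → s.getD i 0 + s.getD j 0 ≤ m) →
    ((m = 0 ∧ p = []) ∨
      (∃ i j : Nat, i < j ∧ j < s.length ∧ (i : Int) < l ∧ s.getD i 0 + s.getD j 0 = m ∧
        0 < m ∧ m ≤ d' ∧ p = [s.getD i 0, s.getD j 0] ∧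
        (∀ i' j' : Nat, i' < j' → j' < s.length → ((i' : Int) < l ∨ r < (j' : Int)) →
          s.getD i' 0 + s.getD j' 0 = m → s.getD i 0 ≤ s.getD i' 0))) →
    TPost s d' (tpLoop s d' l r m p) := by
  intro k
  induction k with
  | zero =>
    intro l r m p hk h0 hlr hr _hm hA hB
    have hlr' : ¬ l < r := by omega
    rw [tpLoop]; simp only [hlr', dite_false]
    have hall : ∀ i j : Nat, i < j → j < s.length → ((i : Int) < l ∨ r < (j : Int)) := by
      intro i j hij hj
      by_cases hi : (i : Int) < l
      · exact Or.inl hi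
      · right; omega
    rcases hB with ⟨hm0, hp⟩ | ⟨i, j, hij, hj, _, hsum, hmpos, hmd, hp, hmin⟩
    · left; refine ⟨hp, ?_⟩
      intro i j hij hj hle
      have := hA i j hij hj (hall i j hij hj) hle
      omega
    · right
      exact ⟨i, j, hij, hj, hsum, hmpos, hmd, hp,
        fun i' j' h1 h2 h3 => hA i' j' h1 h2 (hall i' j' h1 h2) h3,
        fun i' j' h1 h2 h3 => hmin i' j' h1 h2 (hall i' j' h1 h2) h3⟩
  | succ k ih =>
    intro l r m p hk h0 hlr hr hm hA hB
    have hlr' : l < r := by omega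
    have hlN : l.toNat < s.length := by omega
    have hrN : r.toNat < s.length := by omega
    rw [tpLoop]; simp only [hlr', dite_true]
    have hgl := pyGetD_eq_getD s l h0 (by omega)
    have hgr := pyGetD_eq_getD s r (by omega) hr
    rw [hgl, hgr]
    by_cases hcd : s.getD l.toNat 0 + s.getD r.toNat 0 ≤ d'
    · simp only [hcd, if_true]
      by_cases hbeat : s.getD l.toNat 0 + s.getD r.toNat 0 > m
      · simp only [hbeat, if_true]
        have hk' : (r - (l + 1)).toNat = k := by clear hA hB; omega
        have hA' : ∀ i j : Nat, i < j → j < s.length → ((i : Int) < l + 1 ∨ r < (j : Int)) →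
            s.getD i 0 + s.getD j 0 ≤ d' → s.getD i 0 + s.getD j 0 ≤ s.getD l.toNat 0 + s.getD r.toNat 0 := by
          intro i j hij hj hproc hle
          rcases hproc with hi | hj'
          · by_cases hi' : (i : Int) < l
            · have := hA i j hij hj (Or.inl hi') hle; omega
            · have hie : i = l.toNat := by omega
              by_cases hjr : r < (j : Int)
              · have := hA i j hij hj (Or.inr hjr) hle; omega
              · have h1 : s.getD j 0 ≤ s.getD r.toNat 0 := gd_mono s hs (by omega) hrN
                have h2 : s.getD i 0 = s.getD l.toNat 0 := by rw [hie]
                omega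
          · have := hA i j hij hj (Or.inr hj') hle; omega
        have hB' : ∀ i' j' : Nat, i' < j' → j' < s.length → ((i' : Int) < l + 1 ∨ r < (j' : Int)) →
            s.getD i' 0 + s.getD j' 0 = s.getD l.toNat 0 + s.getD r.toNat 0 →
            s.getD l.toNat 0 ≤ s.getD i' 0 := by
          intro i' j' h1 h2 hproc hsum
          rcases hproc with hi | hj'
          · by_cases hi' : (i' : Int) < l
            · have := hA i' j' h1 h2 (Or.inl hi') (by omega); omega
            · have hie : s.getD i' 0 = s.getD l.toNat 0 := by rw [show i' = l.toNat by omega]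
              omega
          · have := hA i' j' h1 h2 (Or.inr hj') (by omega); omega
        exact ih (l + 1) r (s.getD l.toNat 0 + s.getD r.toNat 0)
          [s.getD l.toNat 0, s.getD r.toNat 0] hk' (by omega) (by omega) hr (by omega) hA'
          (Or.inr ⟨l.toNat, r.toNat, by omega, hrN, by omega, rfl, by omega, hcd, rfl, hB'⟩)
      · simp only [hbeat, if_false]
        have hk' : (r - (l + 1)).toNat = k := by clear hA hB; omega
        have hA' : ∀ i j : Nat, i < j → j < s.length → ((i : Int) < l + 1 ∨ r < (j : Int)) →
            s.getD i 0 + s.getD j 0 ≤ d' → s.getD i 0 + s.getD j 0 ≤ m := by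
          intro i j hij hj hproc hle
          rcases hproc with hi | hj'
          · by_cases hi' : (i : Int) < l
            · exact hA i j hij hj (Or.inl hi') hle
            · have hie : i = l.toNat := by omega
              by_cases hjr : r < (j : Int)
              · exact hA i j hij hj (Or.inr hjr) hle
              · have h1 : s.getD j 0 ≤ s.getD r.toNat 0 := gd_mono s hs (by omega) hrN
                have h2 : s.getD i 0 = s.getD l.toNat 0 := by rw [hie]
                omega
          · exact hA i j hij hj (Or.inr hj') hle
        refine ih (l + 1) r m p hk' (by omega) (by omega) hr hm hA' ?_
        rcases hB with hL | ⟨i, j, hij, hj, hil, hsum, hmpos, hmd, hp, hmin⟩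
        · exact Or.inl hL
        · right
          refine ⟨i, j, hij, hj, by omega, hsum, hmpos, hmd, hp, ?_⟩
          intro i' j' h1 h2 hproc hsum'
          rcases hproc with hi | hj'
          · by_cases hi' : (i' : Int) < l
            · exact hmin i' j' h1 h2 (Or.inl hi') hsum'
            · have hie : s.getD i' 0 = s.getD l.toNat 0 := by rw [show i' = l.toNat by omega]
              have : s.getD i 0 ≤ s.getD l.toNat 0 := gd_mono s hs (by omega) hlN
              omega
          · exact hmin i' j' h1 h2 (Or.inr hj') hsum'
    · simp only [hcd, if_false]
      have hk' : (r - 1 - l).toNat = k := by clear hA hB; omega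
      have hA' : ∀ i j : Nat, i < j → j < s.length → ((i : Int) < l ∨ r - 1 < (j : Int)) →
          s.getD i 0 + s.getD j 0 ≤ d' → s.getD i 0 + s.getD j 0 ≤ m := by
        intro i j hij hj hproc hle
        rcases hproc with hi | hj'
        · exact hA i j hij hj (Or.inl hi) hle
        · by_cases hjr : r < (j : Int)
          · exact hA i j hij hj (Or.inr hjr) hle
          · have hje : j = r.toNat := by omega
            by_cases hi' : (i : Int) < l
            · exact hA i j hij hj (Or.inl hi') hle
            · have h1 : s.getD l.toNat 0 ≤ s.getD i 0 := gd_mono s hs (by omega) (by omega)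
              have h2 : s.getD j 0 = s.getD r.toNat 0 := by rw [hje]
              omega
      refine ih l (r - 1) m p hk' h0 (by omega) (by omega) hm hA' ?_
      rcases hB with hL | ⟨i, j, hij, hj, hil, hsum, hmpos, hmd, hp, hmin⟩
      · exact Or.inl hL
      · right
        refine ⟨i, j, hij, hj, hil, hsum, hmpos, hmd, hp, ?_⟩
        intro i' j' h1 h2 hproc hsum'
        rcases hproc with hi | hj'
        · exact hmin i' j' h1 h2 (Or.inl hi) hsum'
        · by_cases hjr : r < (j' : Int)
          · exact hmin i' j' h1 h2 (Or.inr hjr) hsum'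
          · have hje : j' = r.toNat := by omega
            by_cases hi' : (i' : Int) < l
            · exact hmin i' j' h1 h2 (Or.inl hi') hsum'
            · have h1' : s.getD l.toNat 0 ≤ s.getD i' 0 := gd_mono s hs (by omega) (by omega)
              have h2' : s.getD j' 0 = s.getD r.toNat 0 := by rw [hje]
              omega

lemma tp_char (s : List Int) (d' : Int) (hs : s.Pairwise (· ≤ ·)) :
    TPost s d' (tpLoop s d' 0 ((s.length : Int) - 1) 0 []) := by
  by_cases hn : s.length = 0
  · rw [tpLoop]
    have : ¬ (0 : Int) < (s.length : Int) - 1 := by omega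
    simp only [this, dite_false]
    left
    exact ⟨rfl, by intro i j hij hj _; omega⟩
  · apply tp_inv s d' hs ((s.length : Int) - 1 - 0).toNat 0 ((s.length : Int) - 1) 0 [] rfl
      (by omega) (by omega) (by omega) (by omega)
    · intro i j hij hj hproc _
      rcases hproc with hi | hj' <;> omega
    · exact Or.inl ⟨rfl, rfl⟩

-- membership in B's pair list = an index pair i < j of s
lemma mem_bPairs (s : List Int) (x y : Int) :
    (x, y) ∈ bPairs s ↔ ∃ i j : Nat, i < j ∧ j < s.length ∧ x = s.getD i 0 ∧ y = s.getD j 0 := by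
  unfold bPairs
  rw [List.mem_flatMap]
  constructor
  · rintro ⟨kx, hkx, hmem⟩
    rcases List.mem_iff_getElem?.mp hkx with ⟨k, hk⟩
    rw [PySem.List.getElem?_enumerate] at hk
    rcases hko : s[k]? with _ | v
    · rw [hko] at hk; simp at hk
    · rw [hko] at hk
      simp only [Option.map_some] at hk
      have hkl : k < s.length := by
        by_contra hc
        rw [List.getElem?_eq_none (by omega)] at hko; cases hko
      cases hk
      rcases List.mem_map.mp hmem with ⟨y', hy', hxy⟩
      have h01 : (0 : Int) ≤ (0 : Int) + (k : Int) + 1 := by omega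
      rw [PySem.List.slice_from s h01] at hy'
      have htn : ((0 : Int) + (k : Int) + 1).toNat = k + 1 := by omega
      rw [htn] at hy'
      rcases List.mem_iff_getElem.mp hy' with ⟨j', hj', hyv⟩
      rw [List.getElem_drop] at hyv
      have hjl : k + 1 + j' < s.length := by
        have := hj'; rw [List.length_drop] at this; omega
      refine ⟨k, k + 1 + j', by omega, hjl, ?_, ?_⟩
      · have : x = v := by cases hxy; rfl
        rw [this, List.getD_eq_getElem s 0 hkl]
        exact (List.getElem?_eq_some_iff.mp hko).2.symm
      · have : y = y' := by cases hxy; rfl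
        rw [this, List.getD_eq_getElem s 0 hjl, ← hyv]
  · rintro ⟨i, j, hij, hj, hx, hy⟩
    have hil : i < s.length := by omega
    refine ⟨((0 : Int) + (i : Int), s[i]), ?_, ?_⟩
    · apply List.mem_iff_getElem?.mpr
      refine ⟨i, ?_⟩
      rw [PySem.List.getElem?_enumerate, List.getElem?_eq_getElem hil]
      rfl
    · dsimp only
      apply List.mem_map.mpr
      refine ⟨y, ?_, ?_⟩
      · have h01 : (0 : Int) ≤ (0 : Int) + (i : Int) + 1 := by omega
        rw [PySem.List.slice_from s h01]
        have htn : ((0 : Int) + (i : Int) + 1).toNat = i + 1 := by omega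
        rw [htn]
        apply List.mem_iff_getElem.mpr
        refine ⟨j - (i + 1), by rw [List.length_drop]; omega, ?_⟩
        rw [List.getElem_drop]
        rw [hy, List.getD_eq_getElem s 0 hj]
        congr 1; omega
      · rw [hx, List.getD_eq_getElem s 0 hil]

lemma enumerate_pairwise_snd (s : List Int) (hs : s.Pairwise (· ≤ ·)) :
    ∀ s0 : Int, (PySem.List.enumerate s s0).Pairwise (fun a b => a.2 ≤ b.2) := by
  induction s with
  | nil => intro s0; simp [PySem.List.enumerate]
  | cons x xs ih =>
    intro s0
    rw [PySem.List.enumerate_cons]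
    refine List.Pairwise.cons ?_ (ih (List.Pairwise.sublist (List.sublist_cons_self x xs) hs) (s0 + 1))
    intro b hb
    have hb2 : b.2 ∈ xs := by
      have := PySem.List.map_snd_enumerate xs (s0 + 1)
      rw [← this]
      exact List.mem_map_of_mem hb
    exact (List.pairwise_cons.mp hs).1 b.2 hb2

lemma bPairs_pairwise_fst (s : List Int) (hs : s.Pairwise (· ≤ ·)) :
    (bPairs s).Pairwise (fun a b => a.1 ≤ b.1) := by
  unfold bPairs
  rw [List.pairwise_flatMap]
  constructor
  · intro kx _
    rw [List.pairwise_map]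
    exact List.Pairwise.imp (fun _ => le_refl kx.2) (List.pairwise_of_forall_mem_list
      (l := PySem.List.slice s (some (kx.1 + 1)) none) (r := fun _ _ => True) (by intro a _ b _; trivial))
  · apply List.Pairwise.imp ?_ (enumerate_pairwise_snd s hs 0)
    intro a b hab x hx y hy
    rcases List.mem_map.mp hx with ⟨_, _, hx'⟩
    rcases List.mem_map.mp hy with ⟨_, _, hy'⟩
    rw [← hx', ← hy']
    exact hab

-- characterisation of B's single fold
lemma fold_char (d' : Int) (ps : List (Int × Int)) (hps : ps.Pairwise (fun a b => a.1 ≤ b.1)) :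
    (ps.foldl (bStep d') (0, none) = ((0 : Int), (none : Option (Int × Int))) ∧
       ∀ q ∈ ps, q.1 + q.2 ≤ d' → q.1 + q.2 ≤ 0) ∨
    (∃ x y : Int, ps.foldl (bStep d') (0, none) = (x + y, some (x, y)) ∧ (x, y) ∈ ps ∧
       0 < x + y ∧ x + y ≤ d' ∧
       (∀ q ∈ ps, q.1 + q.2 ≤ d' → q.1 + q.2 ≤ x + y) ∧
       (∀ q ∈ ps, q.1 + q.2 = x + y → x ≤ q.1)) := by
  induction ps using List.reverseRecOn with
  | nil => left; exact ⟨rfl, by intro q hq; cases hq⟩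
  | append_singleton ps q ih =>
    have hps' : ps.Pairwise (fun a b => a.1 ≤ b.1) := (List.pairwise_append.mp hps).1
    have hlast : ∀ a ∈ ps, a.1 ≤ q.1 := by
      intro a ha
      exact (List.pairwise_append.mp hps).2.2 a ha q (List.mem_singleton.mpr rfl)
    rw [List.foldl_append, List.foldl_cons, List.foldl_nil]
    rcases ih hps' with ⟨heq, hbound⟩ | ⟨x, y, heq, hmem, hpos, hle, hbound, hmin⟩
    · rw [heq]
      by_cases hq : q.1 + q.2 ≤ d' ∧ ((0 : Int), (none : Option (Int × Int))).1 < q.1 + q.2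
      · right
        refine ⟨q.1, q.2, ?_, by simp, by exact_mod_cast hq.2, hq.1, ?_, ?_⟩
        · unfold bStep; rw [if_pos hq]
        · intro q' hq' hd
          rcases List.mem_append.mp hq' with h | h
          · have := hbound q' h hd; omega
          · have he := List.mem_singleton.mp h; subst he; omega
        · intro q' hq' hsum
          rcases List.mem_append.mp hq' with h | h
          · have := hbound q' h (by omega); simp only at hq; omega
          · have he := List.mem_singleton.mp h; subst he; omega
      · left
        refine ⟨?_, ?_⟩
        · unfold bStep; rw [if_neg hq]
        · intro q' hq' hd
          rcases List.mem_append.mp hq' with h | h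
          · exact hbound q' h hd
          · have he := List.mem_singleton.mp h; subst he
            by_contra hc
            exact hq ⟨hd, by simp only; omega⟩
    · rw [heq]
      by_cases hq : q.1 + q.2 ≤ d' ∧ (x + y, some (x, y)).1 < q.1 + q.2
      · right
        simp only at hq
        refine ⟨q.1, q.2, ?_, by simp, by omega, hq.1, ?_, ?_⟩
        · unfold bStep; rw [if_pos (by simpa using hq)]
        · intro q' hq' hd
          rcases List.mem_append.mp hq' with h | h
          · have := hbound q' h hd; omega
          · have he := List.mem_singleton.mp h; subst he; omega
        · intro q' hq' hsum
          rcases List.mem_append.mp hq' with h | h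
          · have := hbound q' h (by omega); omega
          · have he := List.mem_singleton.mp h; subst he; omega
      · right
        refine ⟨x, y, ?_, List.mem_append_left _ hmem, hpos, hle, ?_, ?_⟩
        · unfold bStep; rw [if_neg hq]
        · intro q' hq' hd
          rcases List.mem_append.mp hq' with h | h
          · exact hbound q' h hd
          · have he := List.mem_singleton.mp h; subst he
            by_contra hc
            exact hq ⟨hd, by simp only; omega⟩
        · intro q' hq' hsum
          rcases List.mem_append.mp hq' with h | h
          · exact hmin q' h hsum
          · have he := List.mem_singleton.mp h; subst he
            exact hlast (x, y) hmem

-- ===== VERDICT (by name: the statement is the Claim_ definition above) =====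
theorem longestPair2_spec : Claim_equal_longestPair2 := by
  intro ary d _
  unfold Spec_longestPair2 longestPair2 longestPair2_alt
  dsimp only
  set d' := d - 30 with hd'
  set origIndex : PySem.Dict Int Int :=
    (PySem.List.enumerate ary).foldl (fun dct iv => dct.insert iv.2 iv.1) PySem.Dict.empty with hOI
  set s := PySem.List.sorted ary (fun x => x) false with hsdef
  have hs : s.Pairwise (· ≤ ·) := PySem.List.sorted_pairwise ary (fun x => x)
  have hA := tp_char s d' hs
  have hB := fold_char d' (bPairs s) (bPairs_pairwise_fst s hs)
  set mp := tpLoop s d' 0 ((s.length : Int) - 1) 0 [] with hmp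
  set bp := (bPairs s).foldl (bStep d') (0, none) with hbp
  unfold TPost at hA
  rcases hA with ⟨hApE, hAno⟩ | ⟨i, j, hij, hj, hsum, hmpos, hmd, hp, hAbound, hAmin⟩
  · -- A found nothing
    rcases hB with ⟨hBeq, _⟩ | ⟨x, y, hBeq, hBmem, hBpos, hBle, _, _⟩
    · have hb2 : bp.2 = none := by rw [hBeq]
      rw [hApE, hb2]; simp
    · exfalso
      rcases (mem_bPairs s x y).mp hBmem with ⟨i, j, hij, hj, hx, hy⟩
      have := hAno i j hij hj (by omega)
      omega
  · -- A found a best pair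
    rcases hB with ⟨hBeq, hBno⟩ | ⟨x, y, hBeq, hBmem, hBpos, hBle, hBbound, hBmin⟩
    · exfalso
      have hmemA : (s.getD i 0, s.getD j 0) ∈ bPairs s :=
        (mem_bPairs s _ _).mpr ⟨i, j, hij, hj, rfl, rfl⟩
      have h := hBno _ hmemA (by dsimp only; omega)
      dsimp only at h
      omega
    · -- both found one: show the recorded values agree
      rcases (mem_bPairs s x y).mp hBmem with ⟨i', j', hij', hj', hx, hy⟩
      have hmemA : (s.getD i 0, s.getD j 0) ∈ bPairs s :=
        (mem_bPairs s _ _).mpr ⟨i, j, hij, hj, rfl, rfl⟩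
      have h1 : mp.1 ≤ x + y := by
        have h := hBbound _ hmemA (by dsimp only; omega)
        dsimp only at h
        omega
      have h2 : x + y ≤ mp.1 := by
        have := hAbound i' j' hij' hj' (by omega)
        omega
      have hxi : x = s.getD i 0 := by
        have hle1 : s.getD i 0 ≤ s.getD i' 0 := hAmin i' j' hij' hj' (by omega)
        have hle2 : x ≤ s.getD i 0 := by
          have h := hBmin _ hmemA (by dsimp only; omega)
          dsimp only at h
          exact h
        omega
      have hyj : y = s.getD j 0 := by omega
      have hb2 : bp.2 = some (x, y) := by rw [hBeq]
      rw [hp, hb2]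
      dsimp only
      have hne : ¬ ([s.getD i 0, s.getD j 0] = ([] : List Int)) := by simp
      rw [if_neg hne]
      have e0 : PySem.List.pyGetD [s.getD i 0, s.getD j 0] 0 0 = s.getD i 0 := by
        simp [PySem.List.pyGetD, PySem.List.pyGet?, PySem.List.pyIdx?]
      have e1 : PySem.List.pyGetD [s.getD i 0, s.getD j 0] 1 0 = s.getD j 0 := by
        simp [PySem.List.pyGetD, PySem.List.pyGet?, PySem.List.pyIdx?]
      rw [e0, e1, hxi, hyj]
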